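-- pv_equiv track=rewrite | github.com/Redpike/advent-of-code | 2018/d21/d21.py | activate_system
-- ===== SOURCE A (Python) =====
-- def activate_system(seti: int, bori: int, bani: int, muli: int, part: int):
--     seen = set()
--     c = 0
--     last_unique_c = -1
--
--     while True:
--         a = c | bori
--         c = seti
--
--         while True:
--             c = (((c + (a & 255)) & bani) * muli) & bani
--
--             if 256 > a:
--                 if part == 1:
--                     return c
--                 else:
--                     if c not in seen:
--                         seen.add(c)
--                         last_unique_c = c
--                         break
--                     else:
--                         return last_unique_c
--             else:
--                 a //= 256
-- ===== SOURCE B (Python) =====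
-- def activate_system(seti: int, bori: int, bani: int, muli: int, part: int):
--     # Floyd tortoise-hare cycle detection in O(1) memory instead of A's seen-set.
--     def digits(a):
--         ds = [a & 255]
--         while a >= 256:
--             a //= 256
--             ds.append(a & 255)
--         return ds
--
--     def step(c):
--         r = seti
--         for d in digits(c | bori):
--             r = (((r + d) & bani) * muli) & bani
--         return r
--
--     x0 = step(0)
--     if part == 1:
--         return x0
--
--     # phase 1: find a meeting point on the cycle of the orbit of x0
--     t, h = step(x0), step(step(x0))
--     while t != h:
--         t, h = step(t), step(step(h))
--     # phase 2: find the first element of the cycle (mu steps from x0)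
--     p, q = x0, h
--     while p != q:
--         p, q = step(p), step(q)
--     # phase 3: walk once around the cycle; the predecessor of p is the
--     # last value inserted before the first repeat
--     prev, q = p, step(p)
--     while q != p:
--         prev, q = q, step(q)
--     return prev
-- ===== Notes on version B (the rewrite author's own statement) =====
-- stated objective: alternative
-- what changed: B replaces A's seen-set cycle detection with Floyd's tortoise-and-hare: phase 1 races a 1x and a 2x pointer to a meeting point on the orbit's cycle, phase 2 advances a pointer from the start and one from the meeting point to find the cycle entry, and phase 3 walks once around the cycle tracking the predecessor, which is exactly the last value A inserts before its first set hit; B keeps O(1) extra memory where A stores every visited value.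
-- outside the precondition, e.g. on activate_system(0, 0, -1, 0, 2): A returns 0, B returns 0
import Mathlib
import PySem

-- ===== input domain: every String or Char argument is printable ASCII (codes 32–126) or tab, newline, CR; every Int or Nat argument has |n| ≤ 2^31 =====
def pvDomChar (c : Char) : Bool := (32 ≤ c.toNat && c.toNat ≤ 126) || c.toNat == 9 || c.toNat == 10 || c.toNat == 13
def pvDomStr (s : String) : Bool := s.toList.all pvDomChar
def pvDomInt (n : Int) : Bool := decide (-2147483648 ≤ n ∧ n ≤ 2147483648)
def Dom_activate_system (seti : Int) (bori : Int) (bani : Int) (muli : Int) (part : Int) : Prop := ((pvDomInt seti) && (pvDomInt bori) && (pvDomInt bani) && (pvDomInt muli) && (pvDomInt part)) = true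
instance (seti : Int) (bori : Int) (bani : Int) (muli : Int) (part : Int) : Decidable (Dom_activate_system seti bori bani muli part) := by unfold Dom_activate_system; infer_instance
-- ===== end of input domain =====

-- B replaces A's seen-set cycle detection by Floyd's tortoise-and-hare (O(1) extra memory,
-- a different algorithm of similar cost); equal on Pre_ (part = 1 or bani ≥ 0).

-- ===== PORT A =====
-- Inner do-while of A: state (c, a); returns Sum.inl v for `return v`,
-- Sum.inr (c', seen', last') for `break` back into the outer loop.
def pvInnerA (bani muli part : Int) (seen : PySem.Set Int) (last c a : Int) :
    Sum Int (Int × PySem.Set Int × Int) :=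
  let c' := PySem.Int.band (PySem.Int.band (c + PySem.Int.band a 255) bani * muli) bani
  if 256 > a then
    if part = 1 then Sum.inl c'
    else if PySem.Set.contains seen c' = true then Sum.inl last
    else Sum.inr (c', (PySem.Set.add seen c', c'))
  else pvInnerA bani muli part seen last c' (PySem.Int.floordiv a 256)
termination_by a.toNat
decreasing_by
  rw [PySem.Int.floordiv_eq_ediv_of_pos (by norm_num : (0:Int) < 256)]
  omega

-- Fuel bound making the `while True`/`while x != y` loops total; wherever Python A returns
-- inside Pre_, every loop below runs far fewer than 2^62 iterations, so the fuel is never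
-- exhausted there (proved via the bound mu + lam ≤ bani + 2 in the lemmas below).
def pvFuel : Nat := 2 ^ 62

-- Outer `while True` of A, made total by fuel.
def pvOuterA (seti bori bani muli part : Int) : Nat → PySem.Set Int → Int → Int → Int
  | 0, _, last, _ => last
  | n+1, seen, last, c =>
    match pvInnerA bani muli part seen last seti (PySem.Int.bor c bori) with
    | Sum.inl v => v
    | Sum.inr (c', seen', last') => pvOuterA seti bori bani muli part n seen' last' c'

def activate_system (seti : Int) (bori : Int) (bani : Int) (muli : Int) (part : Int) : Int :=
  pvOuterA seti bori bani muli part pvFuel PySem.Set.empty (-1) 0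

-- ===== PORT B =====
-- Base-256 digit list of a, low digit first; always at least one digit (Source B's `digits`).
def pvDigitsB (a : Int) : List Int :=
  if a ≥ 256 then
    PySem.Int.band a 255 :: pvDigitsB (PySem.Int.floordiv a 256)
  else [PySem.Int.band a 255]
termination_by a.toNat
decreasing_by
  rw [PySem.Int.floordiv_eq_ediv_of_pos (by norm_num : (0:Int) < 256)]
  omega

-- Source B's `step`
def pvNextC (seti bori bani muli c0 : Int) : Int :=
  (pvDigitsB (PySem.Int.bor c0 bori)).foldl
    (fun c d => PySem.Int.band (PySem.Int.band (c + d) bani * muli) bani) seti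

def pvF (seti bori bani muli : Int) : Int → Int :=
  fun c => pvNextC seti bori bani muli c

-- phase 1: `while t != h: t, h = step(t), step(step(h))`, fueled
def pvPhase1 (f : Int → Int) : Nat → Int → Int → Int
  | 0, _, h => h
  | n+1, t, h => if t = h then h else pvPhase1 f n (f t) (f (f h))

-- phase 2: `while p != q: p, q = step(p), step(q)`, fueled
def pvPhase2 (f : Int → Int) : Nat → Int → Int → Int
  | 0, p, _ => p
  | n+1, p, q => if p = q then p else pvPhase2 f n (f p) (f q)

-- phase 3: `while q != p: prev, q = q, step(q)`, fueled
def pvPhase3 (f : Int → Int) : Nat → Int → Int → Int → Int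
  | 0, _, prev, _ => prev
  | n+1, p, prev, q => if q = p then prev else pvPhase3 f n p q (f q)

def activate_system_alt (seti : Int) (bori : Int) (bani : Int) (muli : Int) (part : Int) : Int :=
  let f := pvF seti bori bani muli
  let x0 := f 0
  if part = 1 then x0
  else
    let h := pvPhase1 f pvFuel (f x0) (f (f x0))
    let p := pvPhase2 f pvFuel x0 h
    pvPhase3 f pvFuel p p (f p)

-- ===== PRECONDITION & SPEC =====
-- Pre_ excludes part ≠ 1 inputs with bani < 0: there the masked hash values are unbounded and
-- A's cycle search need not terminate (A diverges on typical such inputs; on the degenerate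
-- ones where it does return, e.g. muli = 0, B happens to agree, but no bound exists in general).
def Pre_activate_system (seti : Int) (bori : Int) (bani : Int) (muli : Int) (part : Int) : Prop :=
  part = 1 ∨ 0 ≤ bani
instance (seti : Int) (bori : Int) (bani : Int) (muli : Int) (part : Int) : Decidable (Pre_activate_system seti bori bani muli part) := by unfold Pre_activate_system; infer_instance

def pvWitness_activate_system : Int × Int × Int × Int × Int := (123, 456, 255, 65899, 2)

def Spec_activate_system (seti : Int) (bori : Int) (bani : Int) (muli : Int) (part : Int) (out : Int) : Prop := out = activate_system_alt seti bori bani muli part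
instance (seti : Int) (bori : Int) (bani : Int) (muli : Int) (part : Int) (out : Int) : Decidable (Spec_activate_system seti bori bani muli part out) := by unfold Spec_activate_system; infer_instance

-- ===== CLAIM =====
def Claim_equal_activate_system : Prop := ∀ (seti : Int) (bori : Int) (bani : Int) (muli : Int) (part : Int), Dom_activate_system seti bori bani muli part → Pre_activate_system seti bori bani muli part → Spec_activate_system seti bori bani muli part (activate_system seti bori bani muli part)

-- ===== LEMMAS AND PROOFS =====

-- The orbit of 0 under f, shifted by one: pvSeq f i is the (i+1)-st value Python computes.
def pvSeq (f : Int → Int) (i : Nat) : Int := f^[i] (f 0)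

theorem pvSeq_succ (f : Int → Int) (i : Nat) : pvSeq f (i+1) = f (pvSeq f i) :=
  Function.iterate_succ_apply' f i (f 0)

theorem pvSeq_shift (f : Int → Int) (a b k : Nat) (h : pvSeq f a = pvSeq f b) :
    pvSeq f (a + k) = pvSeq f (b + k) := by
  unfold pvSeq at *
  rw [Nat.add_comm a k, Function.iterate_add_apply, h,
      ← Function.iterate_add_apply, Nat.add_comm k b]

-- A's inner do-while computes the fold of the hash step over the base-256 digit list.
theorem pvInnerA_eq (bani muli part : Int) (seen : PySem.Set Int) (last : Int) (c a : Int) :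
    pvInnerA bani muli part seen last c a =
      (let v := (pvDigitsB a).foldl
          (fun c d => PySem.Int.band (PySem.Int.band (c + d) bani * muli) bani) c
       if part = 1 then Sum.inl v
       else if PySem.Set.contains seen v = true then Sum.inl last
       else Sum.inr (v, (PySem.Set.add seen v, v))) := by
  induction a using pvDigitsB.induct generalizing c with
  | case1 a h ih =>
    rw [pvInnerA, pvDigitsB]
    have h2 : ¬ (256 > a) := by omega
    simp only [if_neg h2, if_pos h, List.foldl_cons]
    exact ih _
  | case2 a h =>
    rw [pvInnerA, pvDigitsB]
    have h2 : 256 > a := by omega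
    simp only [if_pos h2, if_neg h, List.foldl_cons, List.foldl_nil]

-- ---- bounds: for bani ≥ 0 every hash value lies in [0, bani] ----

theorem pvBand_bounds (a b : Int) (hb : 0 ≤ b) :
    0 ≤ PySem.Int.band a b ∧ PySem.Int.band a b ≤ b := by
  by_cases ha : 0 ≤ a
  · simp only [PySem.Int.band, if_pos ha, if_pos hb]
    have h := Nat.and_le_right (n := a.toNat) (m := b.toNat)
    omega
  · simp only [PySem.Int.band, if_neg ha, if_pos hb]
    omega

theorem pvFoldBound (bani muli : Int) (hb : 0 ≤ bani) :
    ∀ (ds : List Int), ds ≠ [] → ∀ c : Int,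
      0 ≤ ds.foldl (fun r d => PySem.Int.band (PySem.Int.band (r + d) bani * muli) bani) c ∧
      ds.foldl (fun r d => PySem.Int.band (PySem.Int.band (r + d) bani * muli) bani) c ≤ bani := by
  intro ds
  induction ds with
  | nil => intro h; exact absurd rfl h
  | cons d t ih =>
    intro _ c
    cases t with
    | nil =>
      rw [List.foldl_cons, List.foldl_nil]
      exact pvBand_bounds _ bani hb
    | cons d' t' =>
      rw [List.foldl_cons]
      exact ih (List.cons_ne_nil _ _) _

theorem pvDigitsB_ne_nil (a : Int) : pvDigitsB a ≠ [] := by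
  rw [pvDigitsB]; split_ifs <;> simp

theorem pvF_bound (seti bori bani muli : Int) (hb : 0 ≤ bani) (c : Int) :
    0 ≤ pvF seti bori bani muli c ∧ pvF seti bori bani muli c ≤ bani :=
  pvFoldBound bani muli hb _ (pvDigitsB_ne_nil _) seti

-- pigeonhole: the orbit repeats within bani + 2 steps
theorem pvExistsRep (seti bori bani muli : Int) (hb : 0 ≤ bani) :
    ∃ a b : Nat, a < b ∧ b ≤ bani.toNat + 1 ∧
      pvSeq (pvF seti bori bani muli) a = pvSeq (pvF seti bori bani muli) b := by
  have hmem : ∀ i : Nat, pvSeq (pvF seti bori bani muli) i ∈ Finset.Icc (0:Int) bani := by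
    intro i
    rw [Finset.mem_Icc]
    cases i with
    | zero => exact pvF_bound seti bori bani muli hb 0
    | succ n => rw [pvSeq_succ]; exact pvF_bound seti bori bani muli hb _
  have hcard : (Finset.Icc (0:Int) bani).card < (Finset.range (bani.toNat+2)).card := by
    rw [Int.card_Icc, Finset.card_range]; omega
  obtain ⟨x, hx, y, hy, hxy, he⟩ :=
    Finset.exists_ne_map_eq_of_card_lt_of_maps_to hcard
      (fun i _ => Finset.mem_coe.mpr (hmem i))
  rcases Nat.lt_or_ge x y with h | h
  · exact ⟨x, y, h, by have := Finset.mem_range.mp hy; omega, he⟩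
  · have hyx : y < x := lt_of_le_of_ne h (Ne.symm hxy)
    exact ⟨y, x, hyx, by have := Finset.mem_range.mp hx; omega, he.symm⟩

-- ---- cycle structure: mu = preperiod, L = period of the orbit ----

theorem pvPer (f : Int → Int) (mu L : Nat)
    (hper0 : pvSeq f (mu + L) = pvSeq f mu) :
    ∀ i, mu ≤ i → pvSeq f (i + L) = pvSeq f i := by
  intro i hi
  obtain ⟨d, rfl⟩ : ∃ d, i = mu + d := ⟨i - mu, by omega⟩
  have h := pvSeq_shift f (mu + L) mu d hper0
  have e : mu + d + L = mu + L + d := by omega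
  rw [e, h]

theorem pvPerMul (f : Int → Int) (mu L : Nat)
    (hper0 : pvSeq f (mu + L) = pvSeq f mu) :
    ∀ q i, mu ≤ i → pvSeq f (i + L * q) = pvSeq f i := by
  intro q
  induction q with
  | zero => intro i _; simp
  | succ q ih =>
    intro i hi
    have e : i + L * (q+1) = (i + L * q) + L := by rw [Nat.mul_add]; omega
    rw [e, pvPer f mu L hper0 (i + L * q) (by omega), ih i hi]

theorem pvGeMu (f : Int → Int) (mu : Nat)
    (hmumin : ∀ i p, pvSeq f (i + p + 1) = pvSeq f i → mu ≤ i) :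
    ∀ a b, a < b → pvSeq f a = pvSeq f b → mu ≤ a := by
  intro a b hab he
  refine hmumin a (b - a - 1) ?_
  have e : a + (b - a - 1) + 1 = b := by omega
  rw [e]; exact he.symm

theorem pvDistinct (f : Int → Int) (mu L : Nat) (hL : 0 < L)
    (hper0 : pvSeq f (mu + L) = pvSeq f mu)
    (hLmin : ∀ p, 0 < p → p < L → pvSeq f (mu + p) ≠ pvSeq f mu) :
    ∀ i j, i < j → j < L → pvSeq f (mu + i) ≠ pvSeq f (mu + j) := by
  intro i j hij hj he
  have h2 := pvSeq_shift f (mu + i) (mu + j) (L - j) he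
  have e1 : mu + j + (L - j) = mu + L := by omega
  rw [e1, hper0] at h2
  have e2 : mu + i + (L - j) = mu + (i + (L - j)) := by omega
  rw [e2] at h2
  exact hLmin (i + (L - j)) (by omega) (by omega) h2

theorem pvModeq (f : Int → Int) (mu L : Nat) (hL : 0 < L)
    (hper0 : pvSeq f (mu + L) = pvSeq f mu) :
    ∀ a, mu ≤ a → pvSeq f a = pvSeq f (mu + (a - mu) % L) := by
  intro a ha
  have h1 := Nat.div_add_mod (a - mu) L
  have h2 := pvPerMul f mu L hper0 ((a - mu) / L) (mu + (a - mu) % L) (by omega)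
  have e : (mu + (a - mu) % L) + L * ((a - mu) / L) = a := by omega
  rw [e] at h2
  exact h2

theorem pvDvd (f : Int → Int) (mu L : Nat) (hL : 0 < L)
    (hper0 : pvSeq f (mu + L) = pvSeq f mu)
    (hLmin : ∀ p, 0 < p → p < L → pvSeq f (mu + p) ≠ pvSeq f mu) :
    ∀ a b, mu ≤ a → a ≤ b → pvSeq f a = pvSeq f b → L ∣ (b - a) := by
  intro a b ha hab he
  have ha' := pvModeq f mu L hL hper0 a ha
  have hb' := pvModeq f mu L hL hper0 b (by omega)
  have he' : pvSeq f (mu + (a - mu) % L) = pvSeq f (mu + (b - mu) % L) := by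
    rw [← ha', ← hb', he]
  have hr : (a - mu) % L = (b - mu) % L := by
    by_contra hne
    rcases Nat.lt_or_ge ((a - mu) % L) ((b - mu) % L) with h | h
    · exact pvDistinct f mu L hL hper0 hLmin _ _ h (Nat.mod_lt _ hL) he'
    · exact pvDistinct f mu L hL hper0 hLmin _ _ (by omega) (Nat.mod_lt _ hL) he'.symm
  have hdvd := (Nat.modEq_iff_dvd' (by omega : a - mu ≤ b - mu)).mp hr
  have e : b - mu - (a - mu) = b - a := by omega
  rwa [e] at hdvd

theorem pvNoRepeat (f : Int → Int) (mu L : Nat) (hL : 0 < L)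
    (hmumin : ∀ i p, pvSeq f (i + p + 1) = pvSeq f i → mu ≤ i)
    (hper0 : pvSeq f (mu + L) = pvSeq f mu)
    (hLmin : ∀ p, 0 < p → p < L → pvSeq f (mu + p) ≠ pvSeq f mu) :
    ∀ j, j < mu + L → ∀ i, i < j → pvSeq f i ≠ pvSeq f j := by
  intro j hj i hij he
  have h1 := pvGeMu f mu hmumin i j hij he
  have h2 := pvDvd f mu L hL hper0 hLmin i j h1 (by omega) he
  have h3 := Nat.le_of_dvd (by omega) h2
  omega

-- ---- the fueled loops compute the values the cycle structure names ----

theorem pvPhase1_run (f : Int → Int) (d : Nat)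
    (hmin : ∀ i, i < d → ¬ pvSeq f (i+1) = pvSeq f (2*i+2))
    (hd : pvSeq f (d+1) = pvSeq f (2*d+2)) :
    ∀ n j, j ≤ d → d - j < n →
      pvPhase1 f n (pvSeq f (j+1)) (pvSeq f (2*j+2)) = pvSeq f (2*d+2) := by
  intro n
  induction n with
  | zero => intro j _ h; omega
  | succ n ih =>
    intro j hj hn
    rw [pvPhase1]
    by_cases hjd : j = d
    · subst hjd
      rw [if_pos hd]
    · rw [if_neg (hmin j (by omega))]
      have a1 : f (pvSeq f (j+1)) = pvSeq f (j+1+1) := (pvSeq_succ f (j+1)).symm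
      have a2 : f (f (pvSeq f (2*j+2))) = pvSeq f (2*(j+1)+2) := by
        rw [← pvSeq_succ f (2*j+2), ← pvSeq_succ f (2*j+2+1)]
        congr 1
      rw [a1, a2]
      exact ih (j+1) (by omega) (by omega)

theorem pvPhase2_run (f : Int → Int) (mu ofs : Nat)
    (hmin : ∀ i, i < mu → pvSeq f i ≠ pvSeq f (ofs + i))
    (hmu : pvSeq f mu = pvSeq f (ofs + mu)) :
    ∀ n j, j ≤ mu → mu - j < n →
      pvPhase2 f n (pvSeq f j) (pvSeq f (ofs + j)) = pvSeq f mu := by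
  intro n
  induction n with
  | zero => intro j _ h; omega
  | succ n ih =>
    intro j hj hn
    rw [pvPhase2]
    by_cases hjm : j = mu
    · subst hjm
      rw [if_pos hmu]
    · rw [if_neg (hmin j (by omega))]
      have a1 : f (pvSeq f j) = pvSeq f (j+1) := (pvSeq_succ f j).symm
      have a2 : f (pvSeq f (ofs + j)) = pvSeq f (ofs + (j+1)) := by
        rw [← pvSeq_succ f (ofs + j)]
        congr 1
      rw [a1, a2]
      exact ih (j+1) (by omega) (by omega)

theorem pvPhase3_run (f : Int → Int) (mu L : Nat) (hL : 0 < L)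
    (hLmin : ∀ p, 0 < p → p < L → pvSeq f (mu + p) ≠ pvSeq f mu)
    (hper0 : pvSeq f (mu + L) = pvSeq f mu) :
    ∀ n j, j ≤ L - 1 → L - 1 - j < n →
      pvPhase3 f n (pvSeq f mu) (pvSeq f (mu + j)) (pvSeq f (mu + j + 1)) =
        pvSeq f (mu + (L - 1)) := by
  intro n
  induction n with
  | zero => intro j _ h; omega
  | succ n ih =>
    intro j hj hn
    rw [pvPhase3]
    by_cases hjL : j = L - 1
    · subst hjL
      have e : mu + (L - 1) + 1 = mu + L := by omega
      rw [e, if_pos hper0]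
    · have hne : pvSeq f (mu + j + 1) ≠ pvSeq f mu := by
        have e : mu + j + 1 = mu + (j + 1) := by omega
        rw [e]
        exact hLmin (j+1) (by omega) (by omega)
      rw [if_neg hne]
      have a1 : f (pvSeq f (mu + j + 1)) = pvSeq f (mu + (j+1) + 1) := by
        rw [← pvSeq_succ f (mu + j + 1)]
        congr 1
      rw [a1]
      have e2 : mu + j + 1 = mu + (j+1) := by omega
      rw [e2]
      exact ih (j+1) (by omega) (by omega)

theorem pvOuterA_run (seti bori bani muli part : Int) (hp : ¬ part = 1) (mu L : Nat)
    (hL : 0 < L)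
    (hrep : ∃ i, i < mu + L ∧
      pvSeq (pvF seti bori bani muli) i = pvSeq (pvF seti bori bani muli) (mu + L))
    (hnor : ∀ j, j < mu + L → ∀ i, i < j →
      pvSeq (pvF seti bori bani muli) i ≠ pvSeq (pvF seti bori bani muli) j) :
    ∀ n k (seen : PySem.Set Int) (last c : Int),
      k ≤ mu + L → mu + L - k < n →
      (∀ v, PySem.Set.contains seen v = true ↔
        ∃ i, i < k ∧ pvSeq (pvF seti bori bani muli) i = v) →
      (∀ i, k = i + 1 → last = pvSeq (pvF seti bori bani muli) i) →
      pvNextC seti bori bani muli c = pvSeq (pvF seti bori bani muli) k →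
      pvOuterA seti bori bani muli part n seen last c =
        pvSeq (pvF seti bori bani muli) (mu + L - 1) := by
  intro n
  induction n with
  | zero => intro k seen last c hk hn; omega
  | succ n ih =>
    intro k seen last c hk hn hseen hlast hc
    show (match pvInnerA bani muli part seen last seti (PySem.Int.bor c bori) with
      | Sum.inl v => v
      | Sum.inr (c', seen', last') => pvOuterA seti bori bani muli part n seen' last' c') = _
    rw [pvInnerA_eq]
    simp only [if_neg hp]
    have hc2 : (pvDigitsB (PySem.Int.bor c bori)).foldl
        (fun c d => PySem.Int.band (PySem.Int.band (c + d) bani * muli) bani) seti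
        = pvSeq (pvF seti bori bani muli) k := hc
    rw [hc2]
    by_cases hkL : k = mu + L
    · have ht : PySem.Set.contains seen (pvSeq (pvF seti bori bani muli) k) = true := by
        refine (hseen _).mpr ?_
        obtain ⟨i, hi, he⟩ := hrep
        exact ⟨i, by omega, by rw [he, hkL]⟩
      rw [if_pos ht]
      show last = _
      exact hlast (mu + L - 1) (by omega)
    · have hklt : k < mu + L := by omega
      have hf : ¬ PySem.Set.contains seen (pvSeq (pvF seti bori bani muli) k) = true := by
        intro hcontr
        obtain ⟨i, hi, he⟩ := (hseen _).mp hcontr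
        exact hnor k hklt i hi he
      rw [if_neg hf]
      show pvOuterA seti bori bani muli part n
        (PySem.Set.add seen (pvSeq (pvF seti bori bani muli) k))
        (pvSeq (pvF seti bori bani muli) k) (pvSeq (pvF seti bori bani muli) k) = _
      refine ih (k+1) _ _ _ (by omega) (by omega) ?_ ?_ ?_
      · intro v
        rw [PySem.Set.contains_iff, PySem.Set.mem_add, ← PySem.Set.contains_iff, hseen v]
        constructor
        · rintro (⟨i, hi, he⟩ | he)
          · exact ⟨i, by omega, he⟩
          · exact ⟨k, by omega, he.symm⟩
        · rintro ⟨i, hi, he⟩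
          rcases Nat.lt_or_ge i k with h | h
          · exact Or.inl ⟨i, h, he⟩
          · have : i = k := by omega
            subst this
            exact Or.inr he.symm
      · intro i hi
        have : i = k := by omega
        subst this
        rfl
      · exact (pvSeq_succ (pvF seti bori bani muli) k).symm

-- ===== VERDICT =====
theorem activate_system_spec : Claim_equal_activate_system := by
  intro seti bori bani muli part hdom hpre
  unfold Spec_activate_system activate_system activate_system_alt
  by_cases hp : part = 1
  · have h2 : pvFuel = (pvFuel - 1) + 1 := by norm_num [pvFuel]
    rw [h2]
    show (match pvInnerA bani muli part PySem.Set.empty (-1) seti (PySem.Int.bor 0 bori) with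
      | Sum.inl v => v
      | Sum.inr (c', seen', last') =>
          pvOuterA seti bori bani muli part (pvFuel - 1) seen' last' c') = _
    rw [pvInnerA_eq]
    simp only [if_pos hp, pvNextC, pvF]
  · have hb : 0 ≤ bani := hpre.resolve_left hp
    have hbani31 : bani ≤ 2147483648 := by
      simp only [Dom_activate_system, pvDomInt, Bool.and_eq_true, decide_eq_true_eq] at hdom
      exact hdom.1.1.2.2
    have hFuel : pvFuel = 4611686018427387904 := by norm_num [pvFuel]
    classical
    obtain ⟨a0, b0, hab, hb0, heq⟩ := pvExistsRep seti bori bani muli hb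
    -- mu: least index with a later equal value
    have hPex : ∃ i, ∃ p, pvSeq (pvF seti bori bani muli) (i+p+1) =
        pvSeq (pvF seti bori bani muli) i :=
      ⟨a0, b0 - a0 - 1, by
        have e : a0 + (b0 - a0 - 1) + 1 = b0 := by omega
        rw [e]; exact heq.symm⟩
    set mu := Nat.find hPex with hmudef
    have hmu : ∃ p, pvSeq (pvF seti bori bani muli) (mu+p+1) =
        pvSeq (pvF seti bori bani muli) mu := Nat.find_spec hPex
    have hmumin : ∀ i p, pvSeq (pvF seti bori bani muli) (i+p+1) =
        pvSeq (pvF seti bori bani muli) i → mu ≤ i :=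
      fun i p h => Nat.find_min' hPex ⟨p, h⟩
    -- L: least period at mu
    set L := Nat.find hmu + 1 with hLdef
    have hL : 0 < L := Nat.succ_pos _
    have hper0 : pvSeq (pvF seti bori bani muli) (mu + L) =
        pvSeq (pvF seti bori bani muli) mu := by
      have h := Nat.find_spec hmu
      have e : mu + L = mu + Nat.find hmu + 1 := by omega
      rw [e]; exact h
    have hLmin : ∀ p, 0 < p → p < L → pvSeq (pvF seti bori bani muli) (mu + p) ≠
        pvSeq (pvF seti bori bani muli) mu := by
      intro p hp0 hpL hcon
      refine Nat.find_min hmu (m := p - 1) (by omega) ?_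
      have e : mu + (p-1) + 1 = mu + p := by omega
      rw [e]; exact hcon
    have hnor := pvNoRepeat (pvF seti bori bani muli) mu L hL hmumin hper0 hLmin
    have hbound : mu + L ≤ bani.toNat + 1 := by
      by_contra hcon
      exact hnor b0 (by omega) a0 hab heq
    -- phase 1: least d with s(d+1) = s(2d+2)
    have h1 := Nat.div_add_mod mu L
    have hq0 : L * (mu / L + 1) = L * (mu / L) + L := by rw [Nat.mul_add, Nat.mul_one]
    have hmL : mu % L < L := Nat.mod_lt _ hL
    have hw : pvSeq (pvF seti bori bani muli) ((L*(mu/L+1) - 1) + 1) =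
        pvSeq (pvF seti bori bani muli) (2*(L*(mu/L+1) - 1)+2) := by
      have e1 : (L*(mu/L+1) - 1) + 1 = L*(mu/L+1) := by omega
      have e2 : 2*(L*(mu/L+1) - 1)+2 = L*(mu/L+1) + L * (mu/L+1) := by omega
      rw [e1, e2]
      exact (pvPerMul (pvF seti bori bani muli) mu L hper0 (mu/L+1) (L*(mu/L+1)) (by omega)).symm
    have hTex : ∃ i, pvSeq (pvF seti bori bani muli) (i+1) =
        pvSeq (pvF seti bori bani muli) (2*i+2) := ⟨_, hw⟩
    set d := Nat.find hTex with hddef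
    have hdspec : pvSeq (pvF seti bori bani muli) (d+1) =
        pvSeq (pvF seti bori bani muli) (2*d+2) := Nat.find_spec hTex
    have hdmin : ∀ i, i < d → ¬ pvSeq (pvF seti bori bani muli) (i+1) =
        pvSeq (pvF seti bori bani muli) (2*i+2) := fun i h => Nat.find_min hTex h
    have hdle : d ≤ L*(mu/L+1) - 1 := Nat.find_min' hTex hw
    have hdb : d ≤ mu + L := by omega
    have hph1 := pvPhase1_run (pvF seti bori bani muli) d hdmin hdspec pvFuel 0
      (Nat.zero_le d) (by omega)
    -- the meeting index d+1 is ≥ mu and a multiple of L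
    have hnu1 : mu ≤ d + 1 :=
      pvGeMu (pvF seti bori bani muli) mu hmumin (d+1) (2*d+2) (by omega) hdspec
    have hnu2 : L ∣ d + 1 := by
      have hdvd := pvDvd (pvF seti bori bani muli) mu L hL hper0 hLmin (d+1) (2*d+2)
        hnu1 (by omega) hdspec
      have e : 2*d+2 - (d+1) = d+1 := by omega
      rwa [e] at hdvd
    -- phase 2
    have hm2 : ∀ i, i < mu → pvSeq (pvF seti bori bani muli) i ≠
        pvSeq (pvF seti bori bani muli) (2*d+2 + i) := by
      intro i hi he
      have := pvGeMu (pvF seti bori bani muli) mu hmumin i (2*d+2+i) (by omega) he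
      omega
    have hq2 : pvSeq (pvF seti bori bani muli) mu =
        pvSeq (pvF seti bori bani muli) (2*d+2 + mu) := by
      obtain ⟨q2, hq2'⟩ := hnu2
      have e0 : L * (2*q2) = 2 * (L * q2) := by ring
      have e : 2*d+2 + mu = mu + L * (2*q2) := by omega
      rw [e]
      exact (pvPerMul (pvF seti bori bani muli) mu L hper0 (2*q2) mu (le_refl mu)).symm
    have hph2 := pvPhase2_run (pvF seti bori bani muli) mu (2*d+2) hm2 hq2 pvFuel 0
      (Nat.zero_le mu) (by omega)
    simp only [Nat.add_zero] at hph2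
    -- phase 3
    have hph3 := pvPhase3_run (pvF seti bori bani muli) mu L hL hLmin hper0 pvFuel 0
      (by omega) (by omega)
    simp only [Nat.add_zero] at hph3
    -- A's loop
    have hseen0 : ∀ v : Int, PySem.Set.contains PySem.Set.empty v = true ↔
        ∃ i, i < 0 ∧ pvSeq (pvF seti bori bani muli) i = v := by
      intro v
      rw [PySem.Set.contains_iff]
      simp [PySem.Set.empty]
    have hA := pvOuterA_run seti bori bani muli part hp mu L hL
      ⟨mu, by omega, hper0.symm⟩ hnor pvFuel 0 PySem.Set.empty (-1) 0
      (by omega) (by omega) hseen0 (fun i h => absurd h (by omega)) rfl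
    -- assemble
    simp only [if_neg hp]
    rw [hA]
    have e1 : pvF seti bori bani muli (pvF seti bori bani muli 0) =
        pvSeq (pvF seti bori bani muli) (0+1) := rfl
    rw [e1]
    have e2 : pvF seti bori bani muli (pvSeq (pvF seti bori bani muli) (0+1)) =
        pvSeq (pvF seti bori bani muli) (2*0+2) := rfl
    rw [e2, hph1]
    have e3 : pvF seti bori bani muli 0 = pvSeq (pvF seti bori bani muli) 0 := rfl
    rw [e3, hph2]
    rw [show pvF seti bori bani muli (pvSeq (pvF seti bori bani muli) mu) =
        pvSeq (pvF seti bori bani muli) (mu+1) from (pvSeq_succ _ mu).symm]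
    rw [hph3]
    congr 1
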